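-- pv_equiv track=rewrite | github.com/XivC/StandartsParser | Parsers/RawParser.py | find_substring_intersect
-- ===== SOURCE A (Python) =====
-- def find_substring_intersect(string, substring):
--     string_lst = string.lower().strip().split()
--     substring_lst = substring.lower().strip().split()
--     for testing_word in substring_lst:
--         flag = False
--         for word in string_lst:
--             if testing_word in word:
--                 flag = True
--                 break
--         if not flag:
--             return False
--     return True
-- ===== SOURCE B (Python) =====
-- def find_substring_intersect(string, substring):
--     joined = ' '.join(string.lower().strip().split())
--     return all(w in joined for w in substring.lower().strip().split())
-- ===== Notes on version B (the rewrite author's own statement) =====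
-- stated objective: idiomatic
-- what changed: Replaces the explicit nested loops (flag/break over string tokens per testing word) with one space-joined search string and a single all(w in joined) membership test; safe because split tokens are whitespace-free, so no word can straddle the inserted separator.
import Mathlib
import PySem

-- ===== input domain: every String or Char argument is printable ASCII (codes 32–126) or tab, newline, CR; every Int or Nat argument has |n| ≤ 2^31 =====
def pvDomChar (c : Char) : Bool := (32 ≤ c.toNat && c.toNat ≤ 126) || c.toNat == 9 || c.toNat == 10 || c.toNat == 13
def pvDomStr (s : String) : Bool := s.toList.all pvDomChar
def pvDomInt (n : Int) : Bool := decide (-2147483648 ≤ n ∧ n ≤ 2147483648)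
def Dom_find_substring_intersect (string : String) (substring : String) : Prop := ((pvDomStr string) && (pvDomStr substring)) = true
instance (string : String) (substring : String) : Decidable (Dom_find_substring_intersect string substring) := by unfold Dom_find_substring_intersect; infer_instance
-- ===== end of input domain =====

-- B replaces A's nested flag/break loops with one space-joined search string and a single
-- all-membership test (idiomatic); equivalence holds because split tokens are whitespace-free.

-- ===== PORT A =====
-- inner 'for word in string_lst: if testing_word in word: flag = True; break' + 'if not flag: return False'
def fsiInner (testing_word : String) (string_lst : List String) : Bool :=
  match string_lst with
  | [] => false
  | word :: rest => if PySem.Str.isIn testing_word word then true else fsiInner testing_word rest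

def fsiOuter (substring_lst : List String) (string_lst : List String) : Bool :=
  match substring_lst with
  | [] => true
  | testing_word :: rest =>
      if fsiInner testing_word string_lst then fsiOuter rest string_lst else false

def find_substring_intersect (string : String) (substring : String) : Bool :=
  let string_lst := PySem.Str.split₀ (PySem.Str.strip (PySem.Str.lower string))
  let substring_lst := PySem.Str.split₀ (PySem.Str.strip (PySem.Str.lower substring))
  fsiOuter substring_lst string_lst

-- ===== PORT B =====
def find_substring_intersect_alt (string : String) (substring : String) : Bool :=
  let joined := PySem.Str.join " " (PySem.Str.split₀ (PySem.Str.strip (PySem.Str.lower string)))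
  (PySem.Str.split₀ (PySem.Str.strip (PySem.Str.lower substring))).all
    (fun w => PySem.Str.isIn w joined)

-- ===== PRECONDITION & SPEC =====
def Spec_find_substring_intersect (string : String) (substring : String) (out : Bool) : Prop := out = find_substring_intersect_alt string substring
instance (string : String) (substring : String) (out : Bool) : Decidable (Spec_find_substring_intersect string substring out) := by unfold Spec_find_substring_intersect; infer_instance

-- ===== CLAIM (what is proved, stated in full; the proofs are below) =====
def Claim_equal_find_substring_intersect : Prop := ∀ (string : String) (substring : String), Dom_find_substring_intersect string substring → Spec_find_substring_intersect string substring (find_substring_intersect string substring)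

-- ===== LEMMAS AND PROOFS =====

-- Bool all over a list agrees when the predicates agree on members
lemma pvAllCongrMem {α : Type} {l : List α} {f g : α → Bool}
    (h : ∀ a ∈ l, f a = g a) : l.all f = l.all g := by
  induction l with
  | nil => rfl
  | cons x xs ih => simp_all

-- every token produced by str.split() is nonempty and whitespace-free
lemma split₀_go_tokens (s cur : List Char) (acc : List (List Char))
    (hcur : ∀ c ∈ cur, PySem.Chars.isspace c = false)
    (hacc : ∀ w ∈ acc, w ≠ [] ∧ ∀ c ∈ w, PySem.Chars.isspace c = false) :
    ∀ w ∈ PySem.Chars.split₀.go s cur acc, w ≠ [] ∧ ∀ c ∈ w, PySem.Chars.isspace c = false := by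
  induction s generalizing cur acc with
  | nil =>
    intro w hw
    simp only [PySem.Chars.split₀.go] at hw
    split at hw
    · exact hacc w (by simpa using hw)
    · have h' : w ∈ acc.reverse ∨ w = cur.reverse := by
        simpa [List.mem_append] using hw
      rcases h' with h | h
      · exact hacc w (by simpa using h)
      · subst h
        refine ⟨?_, fun c hc => hcur c (by simpa using hc)⟩
        simpa [List.isEmpty_iff] using (by assumption : ¬ cur.isEmpty = true)
  | cons x rest ih =>
    intro w hw
    simp only [PySem.Chars.split₀.go] at hw
    split at hw
    · split at hw
      · exact ih [] acc (by simp) hacc w hw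
      · refine ih [] (cur.reverse :: acc) (by simp) ?_ w hw
        intro v hv
        rcases List.mem_cons.mp hv with hv | hv
        · subst hv
          refine ⟨?_, fun d hd => hcur d (by simpa using hd)⟩
          simpa [List.isEmpty_iff] using (by assumption : ¬ cur.isEmpty = true)
        · exact hacc v hv
    · refine ih (x :: cur) acc ?_ hacc w hw
      intro d hd
      rcases List.mem_cons.mp hd with hd | hd
      · subst hd; simp_all
      · exact hcur d hd

lemma split₀_tokens (s : List Char) :
    ∀ w ∈ PySem.Chars.split₀ s, w ≠ [] ∧ ∀ c ∈ w, PySem.Chars.isspace c = false := by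
  simpa [PySem.Chars.split₀] using split₀_go_tokens s [] [] (by simp) (by simp)

-- a space-free word is an infix of a ++ ' ' :: b iff it is an infix of a or of b
lemma infix_append_space (w a b : List Char) (hw : ' ' ∉ w) :
    w <:+: (a ++ ' ' :: b) ↔ w <:+: a ∨ w <:+: b := by
  constructor
  · intro h
    rw [← PySem.Chars.isIn_iff_infix, ← PySem.Chars.exists_prefix_drop_iff_isIn] at h
    obtain ⟨j, hj⟩ := h
    by_cases hja : j ≤ a.length
    · rw [List.drop_append_of_le_length hja] at hj
      by_cases hlen : w.length ≤ a.length - j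
      · left
        have heq := List.prefix_iff_eq_take.mp hj
        rw [List.take_append_of_le_length (by simpa using hlen)] at heq
        have hpre : w <+: a.drop j := heq ▸ List.take_prefix _ _
        exact (PySem.Chars.isIn_iff_infix w a).mp
          ((PySem.Chars.exists_prefix_drop_iff_isIn w a).mp ⟨j, hpre⟩)
      · exfalso
        apply hw
        have heq := List.prefix_iff_eq_take.mp hj
        have hidx : a.length - j < (List.take w.length (a.drop j ++ ' ' :: b)).length := by
          simp; omega
        have hval : (List.take w.length (a.drop j ++ ' ' :: b))[a.length - j]'hidx = ' ' := by
          rw [List.getElem_take, List.getElem_append_right (by simp)]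
          simp
        rw [heq]
        exact List.mem_iff_getElem.mpr ⟨a.length - j, hidx, hval⟩
    · right
      obtain ⟨k, rfl⟩ : ∃ k, j = a.length + (k + 1) := ⟨j - a.length - 1, by omega⟩
      rw [List.drop_length_add_append, List.drop_succ_cons] at hj
      exact (PySem.Chars.isIn_iff_infix w b).mp
        ((PySem.Chars.exists_prefix_drop_iff_isIn w b).mp ⟨k, hj⟩)
  · rintro (⟨p, s, rfl⟩ | ⟨p, s, rfl⟩)
    · exact ⟨p, s ++ ' ' :: b, by simp⟩
    · exact ⟨a ++ ' ' :: p, s, by simp⟩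

-- a space-free nonempty word is an infix of ' '.join(toks) iff it is an infix of some token
lemma infix_join_iff (w : List Char) (hw : ' ' ∉ w) (hne : w ≠ []) :
    ∀ toks : List (List Char),
      (w <:+: PySem.Chars.join [' '] toks ↔ ∃ t ∈ toks, w <:+: t) := by
  intro toks
  induction toks with
  | nil =>
    rw [PySem.Chars.join_nil]
    simp [hne]
  | cons x rest ih =>
    cases rest with
    | nil => rw [PySem.Chars.join_singleton]; simp
    | cons y rest' =>
      rw [PySem.Chars.join_cons_cons]
      rw [List.append_assoc, List.singleton_append, infix_append_space w x _ hw, ih]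
      simp only [List.mem_cons, exists_eq_or_imp]

-- the inner flag/break loop is an existence test over the token list
lemma fsiInner_eq_any (tw : String) (toks : List String) :
    fsiInner tw toks = toks.any (fun t => PySem.Str.isIn tw t) := by
  induction toks with
  | nil => rfl
  | cons t rest ih =>
    by_cases h : PySem.Str.isIn tw t = true
    · simp only [fsiInner, List.any_cons, h, Bool.true_or, if_true]
    · have hf : PySem.Str.isIn tw t = false := Bool.eq_false_iff.mpr h
      simp only [fsiInner, List.any_cons, hf, Bool.false_or, ih, Bool.false_eq_true, if_false]

-- the outer loop is an all-test
lemma fsiOuter_eq_all (subs toks : List String) :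
    fsiOuter subs toks = subs.all (fun w => fsiInner w toks) := by
  induction subs with
  | nil => rfl
  | cons w rest ih =>
    by_cases h : fsiInner w toks = true
    · simp only [fsiOuter, List.all_cons, h, Bool.true_and, ih, if_true]
    · have hf : fsiInner w toks = false := Bool.eq_false_iff.mpr h
      simp only [fsiOuter, List.all_cons, hf, Bool.false_and, Bool.false_eq_true, if_false]

-- per-word agreement: searching the joined string equals searching each token
lemma word_agree (w : String) (toks : List String)
    (hw : ' ' ∉ w.toList) (hne : w.toList ≠ [])
    : PySem.Str.isIn w (PySem.Str.join " " toks) = fsiInner w toks := by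
  rw [fsiInner_eq_any, PySem.Str.isIn_eq, PySem.Str.toList_join]
  have hjoin : PySem.Chars.isIn w.toList (PySem.Chars.join [' '] (toks.map String.toList))
      = (toks.map String.toList).any (fun t => PySem.Chars.isIn w.toList t) := by
    by_cases h : PySem.Chars.isIn w.toList (PySem.Chars.join [' '] (toks.map String.toList)) = true
    · have := (infix_join_iff w.toList hw hne (toks.map String.toList)).mp
        ((PySem.Chars.isIn_iff_infix _ _).mp h)
      obtain ⟨t, ht, hinf⟩ := this
      rw [h]
      symm
      simp only [List.any_eq_true]
      exact ⟨t, ht, (PySem.Chars.isIn_iff_infix _ _).mpr hinf⟩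
    · rw [Bool.eq_false_iff.mpr h]
      symm
      simp only [List.any_eq_false]
      intro t ht htrue
      exact h ((PySem.Chars.isIn_iff_infix _ _).mpr
        ((infix_join_iff w.toList hw hne (toks.map String.toList)).mpr
          ⟨t, ht, (PySem.Chars.isIn_iff_infix _ _).mp htrue⟩))
  have : (" ".toList : List Char) = [' '] := rfl
  rw [this] at *
  rw [hjoin]
  simp [List.any_map, PySem.Str.isIn_eq, Function.comp_def]

-- ===== VERDICT (by name: the statement is the Claim_ definition above) =====
theorem find_substring_intersect_spec : Claim_equal_find_substring_intersect := by
  intro string substring _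
  unfold Spec_find_substring_intersect find_substring_intersect find_substring_intersect_alt
  simp only []
  rw [fsiOuter_eq_all]
  apply pvAllCongrMem
  intro w hwmem
  have hwtok := split₀_tokens (PySem.Str.strip (PySem.Str.lower substring)).toList
  have hw' : w.toList ∈ PySem.Chars.split₀ (PySem.Str.strip (PySem.Str.lower substring)).toList := by
    rw [← PySem.Str.split₀_map_toList]
    exact List.mem_map_of_mem hwmem
  obtain ⟨hne, hsp⟩ := hwtok w.toList hw'
  have hnospace : ' ' ∉ w.toList := fun hmem => by
    have := hsp ' ' hmem
    simp [PySem.Chars.isspace] at this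
  exact (word_agree w _ hnospace hne).symm
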